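-- pv_equiv track=rewrite | github.com/iiasa/CWatM_GUI | src/gui/components/main_window.py | parse_content_into_sections
-- ===== SOURCE A (Python) =====
-- def parse_content_into_sections(content):
--     """Parse content into sections dictionary"""
--     sections = {}
--     lines = content.split('\n')
--     current_section = None
--     current_section_lines = []
--
--     for line in lines:
--         line_stripped = line.strip()
--         if line_stripped.startswith('[') and line_stripped.endswith(']'):
--             # Save previous section
--             if current_section:
--                 sections[current_section] = current_section_lines[:]
--             # Start new section
--             current_section = line_stripped
--             current_section_lines = [line]
--         else:
--             if current_section:
--                 current_section_lines.append(line)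
--             else:
--                 # Lines before first section
--                 if 'header' not in sections:
--                     sections['header'] = []
--                 sections['header'].append(line)
--
--     # Save last section
--     if current_section:
--         sections[current_section] = current_section_lines
--
--     return sections
-- ===== SOURCE B (Python) =====
-- def parse_content_into_sections(content):
--     """Parse content into sections dictionary (split/chunk decomposition)."""
--     lines = content.split('\n')
--
--     def is_header(line):
--         s = line.strip()
--         return s.startswith('[') and s.endswith(']')
--
--     def span_plain(ls):
--         """Longest prefix of non-header lines, and the remainder."""
--         body = []
--         while ls and not is_header(ls[0]):
--             body.append(ls[0])
--             ls = ls[1:]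
--         return body, ls
--
--     def chunks(ls):
--         """ls is [] or starts with a header line; list of (name, chunk) pairs."""
--         out = []
--         while ls:
--             head, tail = ls[0], ls[1:]
--             body, ls = span_plain(tail)
--             out.append((head.strip(), [head] + body))
--         return out
--
--     pre, rest = span_plain(lines)
--     if not rest:
--         return {'header': lines}
--     sections = {'header': pre} if pre else {}
--     for name, chunk in chunks(rest):
--         sections[name] = chunk
--     return sections
-- ===== Notes on version B (the rewrite author's own statement) =====
-- stated objective: alternative
-- what changed: A's single stateful loop (current_section/current_section_lines accumulators with interleaved dict writes) is replaced by a split/chunk decomposition: span off the non-header prefix, cut the remainder into header-led chunks, and insert the (name, chunk) pairs into the dict in one final pass.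
import Mathlib
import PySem

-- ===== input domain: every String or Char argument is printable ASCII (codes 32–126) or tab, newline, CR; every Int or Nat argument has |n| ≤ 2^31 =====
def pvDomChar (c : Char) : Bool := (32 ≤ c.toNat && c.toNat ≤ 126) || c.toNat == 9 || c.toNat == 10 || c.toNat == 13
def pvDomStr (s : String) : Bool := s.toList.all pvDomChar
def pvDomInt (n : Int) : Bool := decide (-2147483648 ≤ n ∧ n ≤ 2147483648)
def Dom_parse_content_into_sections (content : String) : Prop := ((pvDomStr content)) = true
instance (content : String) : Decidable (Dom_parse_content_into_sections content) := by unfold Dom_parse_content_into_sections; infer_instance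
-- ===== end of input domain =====

-- B re-implements A's single stateful loop as a split/chunk decomposition (span off the header
-- prefix, then cut the rest into header-led chunks); same return value, no speed claim.

-- ===== PORT A =====
-- one step of A's for-loop; state = (sections, current_section, current_section_lines).
-- `if current_section:` is modelled by the Option match: a saved section name is a stripped
-- line that starts with '[', hence never the falsy "".
def pvStepA (st : PySem.Dict String (List String) × Option String × List String)
    (line : String) : PySem.Dict String (List String) × Option String × List String :=
  let line_stripped := PySem.Str.strip line
  if PySem.Str.startswith line_stripped "[" && PySem.Str.endswith line_stripped "]" then
    let sections := match st.2.1 with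
      | some c => st.1.insert c st.2.2
      | none => st.1
    (sections, some line_stripped, [line])
  else
    match st.2.1 with
    | some _ => (st.1, st.2.1, st.2.2 ++ [line])
    | none =>
      -- if 'header' not in sections: sections['header'] = [] ; sections['header'].append(line)
      let d := if st.1.contains "header" then st.1 else st.1.insert "header" []
      (d.modify "header" [] (· ++ [line]), none, [])

def parse_content_into_sections (content : String) : List (String × List String) :=
  let lines := (PySem.Chars.splitOn content.toList ['\n']).map (fun cs => String.ofList cs)
  let st := lines.foldl pvStepA (PySem.Dict.empty, none, [])
  -- save last section
  let sections := match st.2.1 with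
    | some c => st.1.insert c st.2.2
    | none => st.1
  sections.items

-- ===== PORT B =====
def pvIsHeader (line : String) : Bool :=
  let s := PySem.Str.strip line
  PySem.Str.startswith s "[" && PySem.Str.endswith s "]"

-- span_plain's while loop: body accumulator, ls = ls[1:]
def pvSpan (body : List String) : List String → List String × List String
  | [] => (body, [])
  | l :: ls => if pvIsHeader l then (body, l :: ls) else pvSpan (body ++ [l]) ls

theorem pvSpan_snd_length_le (body : List String) (ls : List String) :
    (pvSpan body ls).2.length ≤ ls.length := by
  induction ls generalizing body with
  | nil => simp [pvSpan]
  | cons l ls ih =>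
    simp only [pvSpan]
    split
    · simp
    · exact le_trans (ih _) (by simp)

-- chunks' while loop: out accumulator
def pvChunksGo (out : List (String × List String)) : List String → List (String × List String)
  | [] => out
  | h :: t =>
    let s := pvSpan [] t
    pvChunksGo (out ++ [(PySem.Str.strip h, h :: s.1)]) s.2
  termination_by ls => ls.length
  decreasing_by
    simpa using Nat.lt_succ_of_le (pvSpan_snd_length_le [] t)

def parse_content_into_sections_alt (content : String) : List (String × List String) :=
  let lines := (PySem.Chars.splitOn content.toList ['\n']).map (fun cs => String.ofList cs)
  let pr := pvSpan [] lines
  if pr.2 = [] then [("header", lines)]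
  else
    let sections : PySem.Dict String (List String) :=
      if pr.1 = [] then PySem.Dict.empty else PySem.Dict.empty.insert "header" pr.1
    ((pvChunksGo [] pr.2).foldl (fun d p => d.insert p.1 p.2) sections).items

-- ===== PRECONDITION & SPEC =====
def Spec_parse_content_into_sections (content : String) (out : List (String × List String)) : Prop := out = parse_content_into_sections_alt content
instance (content : String) (out : List (String × List String)) : Decidable (Spec_parse_content_into_sections content out) := by unfold Spec_parse_content_into_sections; infer_instance

-- ===== CLAIM (what is proved, stated in full; the proofs are below) =====
def Claim_equal_parse_content_into_sections : Prop := ∀ (content : String), Dom_parse_content_into_sections content → Spec_parse_content_into_sections content (parse_content_into_sections content)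

-- ===== LEMMAS AND PROOFS =====

theorem splitOn_go_ne_nil (sep : List Char) (fuel : Nat) (l cur : List Char)
    (acc : List (List Char)) : PySem.Chars.splitOn.go sep fuel l cur acc ≠ [] := by
  induction fuel generalizing l cur acc with
  | zero => simp [PySem.Chars.splitOn.go]
  | succ fuel ih =>
    cases l with
    | nil => simp [PySem.Chars.splitOn.go]
    | cons c rest =>
      rw [PySem.Chars.splitOn.go]
      split
      · exact ih _ _ _
      · exact ih _ _ _

theorem lines_ne_nil (content : String) :
    (PySem.Chars.splitOn content.toList ['\n']).map (fun cs => String.ofList cs) ≠ [] := by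
  simp only [ne_eq, List.map_eq_nil_iff]
  exact splitOn_go_ne_nil _ _ _ _ _

theorem pvSpan_acc (body : List String) (ls : List String) :
    pvSpan body ls = (body ++ (pvSpan [] ls).1, (pvSpan [] ls).2) := by
  induction ls generalizing body with
  | nil => simp [pvSpan]
  | cons l ls ih =>
    simp only [pvSpan]
    split
    · simp
    · simp only [List.nil_append]
      rw [ih (body ++ [l]), ih [l]]; simp

theorem pvSpan_append (ls : List String) :
    (pvSpan [] ls).1 ++ (pvSpan [] ls).2 = ls := by
  induction ls with
  | nil => simp [pvSpan]
  | cons l ls ih =>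
    simp only [pvSpan]
    split
    · simp
    · simp only [List.nil_append]
      rw [pvSpan_acc [l] ls]; simpa using ih

theorem pvSpan_fst_not_header (ls : List String) :
    ∀ l ∈ (pvSpan [] ls).1, pvIsHeader l = false := by
  induction ls with
  | nil => simp [pvSpan]
  | cons l ls ih =>
    simp only [pvSpan]
    split
    · simp
    · simp only [List.nil_append]
      rw [pvSpan_acc [l] ls]
      rename_i h
      intro x hx
      rcases List.mem_append.mp hx with hx | hx
      · simp at hx; simpa [hx] using h
      · exact ih x hx

theorem pvSpan_snd_head_header (ls : List String) (h : String) (t : List String)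
    (he : (pvSpan [] ls).2 = h :: t) : pvIsHeader h = true := by
  induction ls with
  | nil => simp [pvSpan] at he
  | cons l ls ih =>
    simp only [pvSpan] at he
    split at he
    · rename_i hh; cases he; simpa using hh
    · simp only [List.nil_append] at he
      rw [pvSpan_acc [l] ls] at he; exact ih (by simpa using he)

theorem pvChunksGo_append (out : List (String × List String)) (ls : List String) :
    pvChunksGo out ls = out ++ pvChunksGo [] ls := by
  induction hls : ls.length using Nat.strong_induction_on generalizing out ls with
  | _ n ih =>
    cases ls with
    | nil => rw [pvChunksGo, pvChunksGo]; simp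
    | cons h t =>
      rw [pvChunksGo, pvChunksGo]
      simp only [List.nil_append]
      rw [ih ((pvSpan [] t).2.length) (by subst hls; simpa using Nat.lt_succ_of_le (pvSpan_snd_length_le [] t)) (out ++ [(PySem.Str.strip h, h :: (pvSpan [] t).1)]) _ rfl,
          ih ((pvSpan [] t).2.length) (by subst hls; simpa using Nat.lt_succ_of_le (pvSpan_snd_length_le [] t)) ([(PySem.Str.strip h, h :: (pvSpan [] t).1)]) _ rfl]
      simp

-- A's "header"-collecting phase, starting with 'header' already present
theorem foldA_header_phase (ls : List String) (hns : ∀ l ∈ ls, pvIsHeader l = false)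
    (a : List String) :
    ls.foldl pvStepA (PySem.Dict.empty.insert "header" a, none, []) =
      (PySem.Dict.empty.insert "header" (a ++ ls), none, []) := by
  induction ls generalizing a with
  | nil => simp
  | cons l ls ih =>
    have hl : pvIsHeader l = false := hns l (by simp)
    have hrest : ∀ x ∈ ls, pvIsHeader x = false := fun x hx => hns x (by simp [hx])
    simp only [List.foldl_cons]
    have hstep : pvStepA (PySem.Dict.empty.insert "header" a, none, []) l =
        (PySem.Dict.empty.insert "header" (a ++ [l]), none, []) := by
      simp only [pvStepA, pvIsHeader] at hl ⊢
      rw [if_neg (by simpa using hl)]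
      simp only [PySem.Dict.contains_insert_self, if_true]
      rw [PySem.Dict.modify, PySem.Dict.getD_insert_self, PySem.Dict.insert_insert_self]
    rw [hstep, ih hrest (a ++ [l])]
    simp

theorem foldA_none_phase (ls : List String) (hns : ∀ l ∈ ls, pvIsHeader l = false) :
    ls.foldl pvStepA (PySem.Dict.empty, none, []) =
      ((if ls = [] then PySem.Dict.empty else PySem.Dict.empty.insert "header" ls), none, []) := by
  cases ls with
  | nil => simp
  | cons l ls =>
    have hl : pvIsHeader l = false := hns l (by simp)
    simp only [List.foldl_cons, if_neg (List.cons_ne_nil l ls)]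
    have hstep : pvStepA (PySem.Dict.empty, none, []) l =
        (PySem.Dict.empty.insert "header" [l], none, []) := by
      simp only [pvStepA, pvIsHeader] at hl ⊢
      rw [if_neg (by simpa using hl)]
      simp only [PySem.Dict.contains_empty, Bool.false_eq_true, if_false]
      rw [PySem.Dict.modify, PySem.Dict.getD_insert_self, PySem.Dict.insert_insert_self]
      simp
    rw [hstep, foldA_header_phase ls (fun x hx => hns x (by simp [hx])) [l]]
    simp

-- flush A's final state
def pvFinish (st : PySem.Dict String (List String) × Option String × List String) :
    PySem.Dict String (List String) :=
  match st.2.1 with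
  | some c => st.1.insert c st.2.2
  | none => st.1

-- A's section phase equals inserting the pending chunk and then B's chunks
theorem foldA_some_phase (t : List String) (d : PySem.Dict String (List String))
    (c : String) (a : List String) :
    pvFinish (t.foldl pvStepA (d, some c, a)) =
      (((c, a ++ (pvSpan [] t).1) :: pvChunksGo [] (pvSpan [] t).2).foldl
        (fun d p => d.insert p.1 p.2) d) := by
  induction ht : t.length using Nat.strong_induction_on generalizing t d c a with
  | _ n ih =>
    cases t with
    | nil => simp [pvFinish, pvSpan, pvChunksGo]
    | cons l t' =>
      by_cases hl : pvIsHeader l = true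
      · have hstep : pvStepA (d, some c, a) l =
            (d.insert c a, some (PySem.Str.strip l), [l]) := by
          simp only [pvStepA, pvIsHeader] at hl ⊢
          rw [if_pos (by simpa using hl)]
        simp only [List.foldl_cons, hstep]
        rw [ih t'.length (by simp only [List.length_cons] at ht; omega) t' _ _ _ rfl]
        have hspan : pvSpan [] (l :: t') = ([], l :: t') := by
          simp [pvSpan, hl]
        rw [hspan]
        rw [pvChunksGo]
        simp only [List.nil_append]
        rw [pvChunksGo_append [(PySem.Str.strip l, l :: (pvSpan [] t').1)]]
        simp
      · have hl' : pvIsHeader l = false := by simpa using hl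
        have hstep : pvStepA (d, some c, a) l = (d, some c, a ++ [l]) := by
          simp only [pvStepA, pvIsHeader] at hl' ⊢
          rw [if_neg (by simpa using hl')]
        simp only [List.foldl_cons, hstep]
        rw [ih t'.length (by simp only [List.length_cons] at ht; omega) t' d c (a ++ [l]) rfl]
        have hspan : pvSpan [] (l :: t') =
            (l :: (pvSpan [] t').1, (pvSpan [] t').2) := by
          simp only [pvSpan]
          rw [if_neg (by simp [hl'])]
          simp only [List.nil_append]
          rw [pvSpan_acc [l] t']
          simp
        rw [hspan]
        simp

-- the two programs compute the same dictionary, for any non-empty line list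
theorem pv_main (lines : List String) (hne : lines ≠ []) :
    (pvFinish (lines.foldl pvStepA (PySem.Dict.empty, none, []))).items =
      (if (pvSpan [] lines).2 = [] then [("header", lines)]
       else ((pvChunksGo [] (pvSpan [] lines).2).foldl (fun d p => d.insert p.1 p.2)
         (if (pvSpan [] lines).1 = [] then PySem.Dict.empty
          else PySem.Dict.empty.insert "header" (pvSpan [] lines).1)).items) := by
  have hsplit := pvSpan_append lines
  have hpre := pvSpan_fst_not_header lines
  rcases hsp : pvSpan [] lines with ⟨pre, rest⟩
  rw [hsp] at hsplit hpre
  simp only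
  rw [← hsplit] at hne ⊢
  rw [List.foldl_append, foldA_none_phase pre hpre]
  cases rest with
  | nil =>
    rw [if_pos rfl]
    have hpre_ne : pre ≠ [] := by simpa using hne
    rw [if_neg hpre_ne]
    simp [pvFinish, PySem.Dict.insert, PySem.Dict.empty, PySem.Dict.contains]
  | cons h t =>
    rw [if_neg (List.cons_ne_nil h t)]
    have hh : pvIsHeader h = true := pvSpan_snd_head_header lines h t (by rw [hsp])
    have hstep : ∀ d : PySem.Dict String (List String),
        pvStepA (d, none, []) h = (d, some (PySem.Str.strip h), [h]) := by
      intro d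
      simp only [pvStepA, pvIsHeader] at hh ⊢
      rw [if_pos (by simpa using hh)]
    rw [List.foldl_cons, hstep, foldA_some_phase]
    rw [pvChunksGo]
    simp only [List.nil_append]
    rw [pvChunksGo_append [(PySem.Str.strip h, h :: (pvSpan [] t).1)]]
    simp

-- ===== VERDICT (by name: the statement is the Claim_ definition above) =====
theorem parse_content_into_sections_spec : Claim_equal_parse_content_into_sections := by
  intro content _
  unfold Spec_parse_content_into_sections
  show (pvFinish (((PySem.Chars.splitOn content.toList ['\n']).map
      (fun cs => String.ofList cs)).foldl pvStepA (PySem.Dict.empty, none, []))).items = _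
  rw [pv_main _ (lines_ne_nil content)]
  rfl
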